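-- pv_equiv track=rewrite | github.com/pypi-data/pypi-mirror-391 | packages/wxswutilsapi/wxswutilsapi-0.1.77.tar.gz/wxswutilsapi-0.1.77/wxswutilsapi/print.py | decode_printer_status
-- ===== SOURCE A (Python) =====
-- def decode_printer_status(status):
--     status_map = {
--         0x00000000: "空闲",
--         0x00000001: "暂停",
--         0x00000002: "出错",
--         0x00000004: "正在删除",
--         0x00000008: "正在打印",
--         0x00000010: "准备接收",
--         0x00000020: "离线",
--         0x00000040: "未响应",
--         0x00000080: "纸张缺失",
--         0x00000100: "门开",
--         0x00000200: "墨盒/色带问题",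
--         0x00000400: "纸张堵塞",
--         0x00000800: "用户干预",
--         0x00001000: "正在初始化",
--         0x00002000: "正在清洗",
--         0x00004000: "正在等待",
--         0x00008000: "处理",
--         0x00040000: "忙碌",
--         0x00400000: "输出托盘满",
--     }
--     if status == 0:
--         return "空闲"
--     readable_status = []
--     for code, msg in status_map.items():
--         if status & code:
--             readable_status.append(msg)
--     return "，".join(readable_status) if readable_status else "未知状态"
-- ===== SOURCE B (Python) =====
-- ALL_MASK = 0x0044FFFF
--
-- NAMES = {
--     0: "暂停",
--     1: "出错",
--     2: "正在删除",
--     3: "正在打印",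
--     4: "准备接收",
--     5: "离线",
--     6: "未响应",
--     7: "纸张缺失",
--     8: "门开",
--     9: "墨盒/色带问题",
--     10: "纸张堵塞",
--     11: "用户干预",
--     12: "正在初始化",
--     13: "正在清洗",
--     14: "正在等待",
--     15: "处理",
--     18: "忙碌",
--     22: "输出托盘满",
-- }
--
--
-- def decode_printer_status(status):
--     if status == 0:
--         return "空闲"
--     s = status & ALL_MASK  # nonnegative; only the 18 known flag bits survive
--     parts = []
--     i = 0
--     while s:
--         if s & 1:
--             parts.append(NAMES[i])
--         s >>= 1
--         i += 1
--     return "，".join(parts) if parts else "未知状态"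
-- ===== Notes on version B (the rewrite author's own statement) =====
-- stated objective: idiomatic
-- what changed: B masks the status with the precomputed OR of all flag codes and then loops over the set bits of that number (halving / bit-index walk keyed by bit position), instead of A's scan of the whole 19-entry code table testing status & code for every row.
import Mathlib
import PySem

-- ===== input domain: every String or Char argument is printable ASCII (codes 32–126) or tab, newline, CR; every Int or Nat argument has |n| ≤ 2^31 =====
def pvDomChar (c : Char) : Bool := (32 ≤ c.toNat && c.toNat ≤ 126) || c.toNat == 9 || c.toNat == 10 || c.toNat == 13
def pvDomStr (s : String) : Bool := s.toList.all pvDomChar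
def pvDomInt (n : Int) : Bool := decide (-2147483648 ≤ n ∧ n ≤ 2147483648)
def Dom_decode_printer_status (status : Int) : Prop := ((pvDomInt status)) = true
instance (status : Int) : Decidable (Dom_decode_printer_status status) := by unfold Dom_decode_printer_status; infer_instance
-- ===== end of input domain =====

-- B iterates over the set bits of the masked status (halving loop over the number's
-- binary digits, keyed by bit index) instead of scanning the whole 19-entry table;
-- objective: alternative/idiomatic, same exact return value.

-- ===== PORT A =====
def pvStatusMap : List (Int × String) :=
  [(0x00000000, "空闲"), (0x00000001, "暂停"), (0x00000002, "出错"),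
   (0x00000004, "正在删除"), (0x00000008, "正在打印"), (0x00000010, "准备接收"),
   (0x00000020, "离线"), (0x00000040, "未响应"), (0x00000080, "纸张缺失"),
   (0x00000100, "门开"), (0x00000200, "墨盒/色带问题"), (0x00000400, "纸张堵塞"),
   (0x00000800, "用户干预"), (0x00001000, "正在初始化"), (0x00002000, "正在清洗"),
   (0x00004000, "正在等待"), (0x00008000, "处理"), (0x00040000, "忙碌"),
   (0x00400000, "输出托盘满")]

def decode_printer_status (status : Int) : String :=
  if status = 0 then "空闲"
  else
    let readable :=
      pvStatusMap.foldl
        (fun acc p => if PySem.Int.band status p.1 ≠ 0 then acc ++ [p.2] else acc) []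
    if readable ≠ [] then PySem.Str.join "，" readable else "未知状态"

-- ===== PORT B =====
def pvAllMask : Int := 0x0044FFFF

def pvNames : PySem.Dict Nat String :=
  PySem.Dict.ofList
    [(0, "暂停"), (1, "出错"), (2, "正在删除"), (3, "正在打印"), (4, "准备接收"),
     (5, "离线"), (6, "未响应"), (7, "纸张缺失"), (8, "门开"), (9, "墨盒/色带问题"),
     (10, "纸张堵塞"), (11, "用户干预"), (12, "正在初始化"), (13, "正在清洗"),
     (14, "正在等待"), (15, "处理"), (18, "忙碌"), (22, "输出托盘满")]

-- the `while s:` loop of Source B; s = status & ALL_MASK is nonnegative, so it is carried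
-- as a Nat.  NAMES[i] can never miss a key on the bits the mask lets through, so the
-- lookup is ported with getD (the default is unreachable).
def pvWalk (s : Nat) (i : Nat) : List String :=
  if s = 0 then []
  else (if s &&& 1 = 1 then [PySem.Dict.getD pvNames i ""] else []) ++ pvWalk (s >>> 1) (i + 1)
termination_by s
decreasing_by simpa [Nat.shiftRight_one] using Nat.div_lt_self (by omega) (by omega)

def decode_printer_status_alt (status : Int) : String :=
  if status = 0 then "空闲"
  else
    let parts := pvWalk (PySem.Int.band status pvAllMask).toNat 0
    if parts ≠ [] then PySem.Str.join "，" parts else "未知状态"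

-- ===== PRECONDITION & SPEC =====
def Spec_decode_printer_status (status : Int) (out : String) : Prop := out = decode_printer_status_alt status
instance (status : Int) (out : String) : Decidable (Spec_decode_printer_status status out) := by unfold Spec_decode_printer_status; infer_instance

-- ===== CLAIM (what is proved, stated in full; the proofs are below) =====
def Claim_equal_decode_printer_status : Prop := ∀ (status : Int), Dom_decode_printer_status status → Spec_decode_printer_status status (decode_printer_status status)

-- ===== LEMMAS AND PROOFS =====

-- B's table, with absolute bit indices (proof helper only)
def pvNamesT : List (Nat × String) :=
  [(0, "暂停"), (1, "出错"), (2, "正在删除"), (3, "正在打印"), (4, "准备接收"),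
   (5, "离线"), (6, "未响应"), (7, "纸张缺失"), (8, "门开"), (9, "墨盒/色带问题"),
   (10, "纸张堵塞"), (11, "用户干预"), (12, "正在初始化"), (13, "正在清洗"),
   (14, "正在等待"), (15, "处理"), (18, "忙碌"), (22, "输出托盘满")]

lemma pvSubAnd (n : Nat) : ∀ m : Nat, n - (n &&& m) = Nat.ldiff n m := by
  induction n using Nat.binaryRec with
  | zero =>
    intro m
    have h : Nat.ldiff 0 m = 0 := by
      apply Nat.zero_of_testBit_eq_false
      intro i; simp [Nat.testBit_ldiff]
    simp [h]
  | bit b n ih =>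
    intro m
    cases m using Nat.bitCasesOn with
    | bit c m' =>
      rw [Nat.land_bit, Nat.ldiff_bit, ← ih m']
      have h1 : n &&& m' ≤ n := Nat.and_le_left
      cases b <;> cases c <;> simp [Nat.bit_val] <;> omega

lemma pvBandMask (status : Int) :
    ∃ a : Nat, PySem.Int.band status pvAllMask = (a : Int)
      ∧ (∀ j, a.testBit j = true → Nat.testBit 4521983 j = true)
      ∧ (∀ i, Nat.testBit 4521983 i = true →
          (a.testBit i = true ↔ PySem.Int.band status (((2 ^ i : Nat) : Int)) ≠ 0)) := by
  by_cases hs : 0 ≤ status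
  · refine ⟨status.toNat &&& 4521983, ?_, ?_, ?_⟩
    · unfold PySem.Int.band pvAllMask
      rw [if_pos hs, if_pos (by norm_num)]
      rfl
    · intro j hj
      rw [Nat.testBit_land] at hj
      exact (Bool.and_eq_true _ _ ▸ hj).2
    · intro i hi
      have hb : PySem.Int.band status (((2 ^ i : Nat) : Int)) = ((status.toNat &&& 2 ^ i : Nat) : Int) := by
        unfold PySem.Int.band
        rw [if_pos hs, if_pos (Int.natCast_nonneg _), Int.toNat_natCast]
      rw [hb, Nat.testBit_land, hi, Bool.and_true]
      have hpos := Nat.two_pow_pos i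
      rcases ht : status.toNat.testBit i
      · simp [Nat.and_two_pow, ht]
      · simp [Nat.and_two_pow, ht]
  · have hdef : ∀ b : Nat, PySem.Int.band status ((b : Nat) : Int) = ((Nat.ldiff b (-status - 1).toNat : Nat) : Int) := by
      intro b
      rw [← pvSubAnd]
      unfold PySem.Int.band
      rw [if_neg hs, if_pos (Int.natCast_nonneg _), Int.toNat_natCast]
    refine ⟨Nat.ldiff 4521983 (-status - 1).toNat, ?_, ?_, ?_⟩
    · have := hdef 4521983
      rw [show pvAllMask = ((4521983 : Nat) : Int) by norm_num [pvAllMask]]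
      exact this
    · intro j hj
      rw [Nat.testBit_ldiff] at hj
      exact (Bool.and_eq_true _ _ ▸ hj).1
    · intro i hi
      rw [hdef (2 ^ i), Nat.testBit_ldiff, hi, Bool.true_and]
      have hpos := Nat.two_pow_pos i
      rw [← pvSubAnd, Nat.two_pow_and]
      rcases ht : (-status - 1).toNat.testBit i
      · simp
      · simp

lemma pvWalk_eq (s : Nat) : ∀ (i : Nat) (T : List (Nat × String)),
    List.Pairwise (fun p q => p.1 < q.1) T →
    (∀ p ∈ T, i ≤ p.1 ∧ PySem.Dict.getD pvNames p.1 "" = p.2) →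
    (∀ j, s.testBit j = true → (i + j) ∈ T.map (·.1)) →
    pvWalk s i = (T.filter (fun p => s.testBit (p.1 - i))).map (·.2) := by
  induction s using Nat.strong_induction_on with
  | _ s ih =>
    intro i T hsort hT hbits
    by_cases hz : s = 0
    · subst hz
      rw [pvWalk]
      simp
    · have hhalf : s >>> 1 < s := by
        simpa [Nat.shiftRight_one] using Nat.div_lt_self (by omega) (by omega)
      have hbt : s.testBit 0 = true ↔ s &&& 1 = 1 := by
        simp [Nat.testBit, Nat.shiftRight_zero, Nat.and_one_is_mod]
      have hshift : ∀ j, (s >>> 1).testBit j = s.testBit (1 + j) := fun j => Nat.testBit_shiftRight s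
      cases T with
      | nil =>
        exfalso
        apply hz
        apply Nat.zero_of_testBit_eq_false
        intro j
        by_contra hj
        have := hbits j (by simpa using hj)
        simp at this
      | cons p rest =>
        have hrest : ∀ q ∈ rest, p.1 < q.1 := (List.pairwise_cons.mp hsort).1
        by_cases hp1 : p.1 = i
        · -- head is the current bit position
          have hIH : pvWalk (s >>> 1) (i + 1)
              = (rest.filter (fun q => (s >>> 1).testBit (q.1 - (i + 1)))).map (·.2) := by
            apply ih _ hhalf
            · exact (List.pairwise_cons.mp hsort).2
            · intro q hq
              have h1 := hrest q hq
              have h2 := hT q (List.mem_cons_of_mem _ hq)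
              exact ⟨by omega, h2.2⟩
            · intro j hj
              have := hbits (1 + j) (by rw [← hshift j]; exact hj)
              rcases List.mem_map.mp this with ⟨q, hq, hq1⟩
              rcases List.mem_cons.mp hq with h | h
              · exfalso; subst h; omega
              · exact List.mem_map.mpr ⟨q, h, by omega⟩
          have hfilt : (rest.filter (fun q => (s >>> 1).testBit (q.1 - (i + 1))))
              = (rest.filter (fun q => s.testBit (q.1 - i))) := by
            apply List.filter_congr
            intro q hq
            have h1 := hrest q hq
            rw [hshift]
            congr 1
            omega
          rw [pvWalk, if_neg hz]
          by_cases hb : s &&& 1 = 1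
          · have hb0 : s.testBit 0 = true := hbt.mpr hb
            rw [if_pos hb, hIH, hfilt]
            have hhead : s.testBit (p.1 - i) = true := by
              rw [hp1]; simpa using hb0
            rw [List.filter_cons_of_pos (by simpa using hhead), List.map_cons]
            have := (hT p (List.mem_cons_self)).2
            rw [hp1] at this
            simp [this]
          · have hb0 : s.testBit 0 = false := by
              cases hx : s.testBit 0
              · rfl
              · exact absurd (hbt.mp hx) hb
            rw [if_neg hb, hIH, hfilt]
            have hhead : s.testBit (p.1 - i) = false := by rw [hp1]; simpa using hb0
            rw [List.filter_cons_of_neg (by simp [hhead])]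
            simp
        · -- the current bit position is below every table entry, so it must be unset
          have hge : ∀ q ∈ p :: rest, i + 1 ≤ q.1 := by
            intro q hq
            rcases List.mem_cons.mp hq with h | h
            · subst h
              have h2 := (hT q (List.mem_cons_self)).1
              have h3 : ¬ q.1 = i := hp1
              omega
            · have := hrest q h
              have := (hT p (List.mem_cons_self)).1
              omega
          have hb0 : s.testBit 0 = false := by
            by_contra hb
            have hb' : s.testBit 0 = true := by simpa using hb
            have := hbits 0 hb'
            rcases List.mem_map.mp this with ⟨q, hq, hq1⟩
            have := hge q hq
            omega
          have hb : ¬ (s &&& 1 = 1) := fun h => by rw [hbt.mpr h] at hb0; cases hb0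
          rw [pvWalk, if_neg hz, if_neg hb]
          have hIH : pvWalk (s >>> 1) (i + 1)
              = ((p :: rest).filter (fun q => (s >>> 1).testBit (q.1 - (i + 1)))).map (·.2) := by
            apply ih _ hhalf
            · exact hsort
            · intro q hq
              exact ⟨hge q hq, (hT q hq).2⟩
            · intro j hj
              have := hbits (1 + j) (by rw [← hshift j]; exact hj)
              rcases List.mem_map.mp this with ⟨q, hq, hq1⟩
              exact List.mem_map.mpr ⟨q, hq, by omega⟩
          rw [hIH]
          simp only [List.nil_append]
          congr 1
          apply List.filter_congr
          intro q hq
          have h1 := hge q hq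
          rw [hshift]
          congr 1
          omega

-- A's table is B's table with codes 2^index (plus the inert code-0 row)
lemma pvTables : pvStatusMap
    = (0, "空闲") :: pvNamesT.map (fun q => (((2 ^ q.1 : Nat) : Int), q.2)) := by
  decide

theorem decode_printer_status_spec_aux (status : Int) :
    decode_printer_status status = decode_printer_status_alt status := by
  by_cases h0 : status = 0
  · simp [decode_printer_status, decode_printer_status_alt, h0]
  · rcases pvBandMask status with ⟨a, ha, hmask, hkey⟩
    -- A's readable list as a filter of B's table
    have hA : pvStatusMap.foldl
        (fun acc p => if PySem.Int.band status p.1 ≠ 0 then acc ++ [p.2] else acc) []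
        = (pvNamesT.filter (fun q => a.testBit q.1)).map (·.2) := by
      have := PySem.List.foldl_append_if
        (fun p : Int × String => decide (PySem.Int.band status p.1 ≠ 0)) (·.2) pvStatusMap []
      rw [show (fun (acc : List String) (p : Int × String) =>
            if PySem.Int.band status p.1 ≠ 0 then acc ++ [p.2] else acc)
          = (fun acc p => if decide (PySem.Int.band status p.1 ≠ 0) = true then acc ++ [p.2] else acc) by
            funext acc p; simp]
      rw [this, pvTables, List.nil_append]
      rw [List.filter_cons_of_neg (by simp [PySem.Int.band_zero])]
      rw [List.filter_map, List.map_map]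
      have hfc : (pvNamesT.filter
            ((fun p : Int × String => decide (PySem.Int.band status p.1 ≠ 0)) ∘
              (fun q : Nat × String => (((2 ^ q.1 : Nat) : Int), q.2))))
          = pvNamesT.filter (fun q => a.testBit q.1) := by
        have hall : ∀ q ∈ pvNamesT, Nat.testBit 4521983 q.1 = true := by decide
        apply List.filter_congr
        intro q hq
        have hm := hall q hq
        have := hkey q.1 hm
        simp only [Function.comp]
        rcases hb : a.testBit q.1
        · simp [hb] at this; simp [this]
        · simp [hb] at this; simp [this]
      rw [hfc]
      rfl
    -- B's parts list is the same filter
    have hB : pvWalk (PySem.Int.band status pvAllMask).toNat 0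
        = (pvNamesT.filter (fun q => a.testBit q.1)).map (·.2) := by
      rw [ha, Int.toNat_natCast]
      have := pvWalk_eq a 0 pvNamesT
        (by decide)
        (by decide)
        (by
          have hall2 : ∀ j, j < 23 → Nat.testBit 4521983 j = true → j ∈ pvNamesT.map (·.1) := by decide
          intro j hj
          have hm := hmask j hj
          have hlt : j < 23 := by
            by_contra hge
            have h23 : (4521983 : Nat) < 2 ^ 23 := by norm_num
            have hle : (2 : Nat) ^ 23 ≤ 2 ^ j := Nat.pow_le_pow_right (by omega) (by omega)
            rw [Nat.testBit_eq_false_of_lt (lt_of_lt_of_le h23 hle)] at hm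
            exact Bool.false_ne_true hm
          simpa using hall2 j hlt hm)
      rw [this]
      simp
    simp only [decode_printer_status, decode_printer_status_alt, if_neg h0]
    rw [hA, hB]

-- ===== VERDICT (by name: the statement is the Claim_ definition above) =====
theorem decode_printer_status_spec : Claim_equal_decode_printer_status := by
  intro status _
  exact decode_printer_status_spec_aux status
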